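-- pv_equiv track=rewrite | github.com/flashman/code-samples | benchling/q4/q4.py | n_similar_v2
-- ===== SOURCE A (Python) =====
-- def n_similar_v2(ref, seqs, dist=3):
--     n = 0
--     ln = len(ref)
--     for seq in seqs:
--         if len(seq) != ln:
--             continue
--         rot = seq * 2
--         for i in range(len(seq)):
--             d = sum(s != r for s, r in zip(rot[i : i + ln], ref))
--             if d <= dist:
--                 n += 1
--                 break
--
--     return n
-- ===== SOURCE B (Python) =====
-- def n_similar_v2(ref, seqs, dist=3):
--     # Builds, per sequence, a histogram of mismatch counts for every rotation
--     # offset in one pass over all (ref position, seq position) pairs, then asks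
--     # whether any rotation's mismatch count is within dist.
--     ln = len(ref)
--     count = 0
--     for seq in seqs:
--         if len(seq) != ln:
--             continue
--         diffs = [0] * ln
--         for j, cr in enumerate(ref):
--             for k, ck in enumerate(seq):
--                 if ck != cr:
--                     diffs[(k - j) % ln] += 1
--         if any(d <= dist for d in diffs):
--             count += 1
--     return count
-- ===== Notes on version B (the rewrite author's own statement) =====
-- stated objective: alternative
-- what changed: Instead of testing each rotation separately by slicing a doubled string and comparing it to ref (with an early break), B makes one pass over all (ref position, seq position) pairs, binning each mismatching pair into a histogram indexed by rotation offset (k - j) % ln, and then checks whether any rotation's mismatch count is within dist.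
import Mathlib
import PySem

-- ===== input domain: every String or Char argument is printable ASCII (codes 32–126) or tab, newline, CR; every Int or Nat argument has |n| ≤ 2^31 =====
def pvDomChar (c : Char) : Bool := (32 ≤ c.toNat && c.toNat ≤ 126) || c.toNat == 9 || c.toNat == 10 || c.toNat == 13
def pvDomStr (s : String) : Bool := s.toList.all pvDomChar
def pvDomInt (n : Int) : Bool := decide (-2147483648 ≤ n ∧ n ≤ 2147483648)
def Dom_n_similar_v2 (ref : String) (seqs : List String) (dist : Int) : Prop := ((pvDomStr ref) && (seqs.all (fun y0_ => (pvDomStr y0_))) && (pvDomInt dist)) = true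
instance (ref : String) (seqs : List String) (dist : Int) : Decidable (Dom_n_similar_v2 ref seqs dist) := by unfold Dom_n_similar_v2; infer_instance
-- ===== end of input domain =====

-- ===== PORT A =====
-- B replaces A's per-rotation slice-and-compare with a one-pass histogram of
-- mismatch counts per rotation offset (objective: alternative, same asymptotic cost).

-- A's inner 'for i in range(len(seq)):' loop with its break
def pvAInner (rot refl : List Char) (ln : Nat) (dist : Int) : List Int → Bool
  | [] => false
  | i :: rest =>
    let d : Nat := ((PySem.List.slice rot (some i) (some (i + (ln : Int)))).zip refl).countP
      (fun p => p.1 != p.2)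
    if (d : Int) ≤ dist then true else pvAInner rot refl ln dist rest

def n_similar_v2 (ref : String) (seqs : List String) (dist : Int) : Int :=
  let refl := ref.toList
  let ln := refl.length
  seqs.foldl (fun n seq =>
    let s := seq.toList
    if s.length ≠ ln then n
    else if pvAInner (s ++ s) refl ln dist (PySem.List.pyRange 0 (s.length : Int) 1) then n + 1
    else n) 0

-- ===== PORT B =====
-- 'diffs' histogram: diffs[(k - j) % ln] += 1 for every mismatching pair (ref[j], seq[k])
def pvBDiffs (refl s : List Char) (ln : Nat) : List Nat :=
  (PySem.List.enumerate refl).foldl (fun diffs jc =>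
    (PySem.List.enumerate s).foldl (fun diffs kc =>
      if kc.2 != jc.2 then
        diffs.modify ((PySem.Int.mod (kc.1 - jc.1) (ln : Int)).toNat) (· + 1)
      else diffs) diffs) (List.replicate ln 0)

def n_similar_v2_alt (ref : String) (seqs : List String) (dist : Int) : Int :=
  let refl := ref.toList
  let ln := refl.length
  seqs.foldl (fun count seq =>
    let s := seq.toList
    if s.length ≠ ln then count
    else if (pvBDiffs refl s ln).any (fun d => decide ((d : Int) ≤ dist)) then count + 1
    else count) 0

-- ===== PRECONDITION & SPEC =====
def Spec_n_similar_v2 (ref : String) (seqs : List String) (dist : Int) (out : Int) : Prop := out = n_similar_v2_alt ref seqs dist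
instance (ref : String) (seqs : List String) (dist : Int) (out : Int) : Decidable (Spec_n_similar_v2 ref seqs dist out) := by unfold Spec_n_similar_v2; infer_instance

-- ===== CLAIM (what is proved, stated in full; the proofs are below) =====
def Claim_equal_n_similar_v2 : Prop := ∀ (ref : String) (seqs : List String) (dist : Int), Dom_n_similar_v2 ref seqs dist → Spec_n_similar_v2 ref seqs dist (n_similar_v2 ref seqs dist)

-- ===== LEMMAS AND PROOFS =====

-- the mismatch count of rotation r, as a countP over positions of ref
def pvMism (s refl : List Char) (n r : Nat) : Nat :=
  (List.range n).countP (fun j => s.getD ((r + j) % n) 'A' != refl.getD j 'A')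

-- A's slice-distance at offset i
def pvDA (rot refl : List Char) (ln : Nat) (i : Int) : Nat :=
  ((PySem.List.slice rot (some i) (some (i + (ln : Int)))).zip refl).countP (fun p => p.1 != p.2)

theorem pvAInner_eq_any (rot refl : List Char) (ln : Nat) (dist : Int) (l : List Int) :
    pvAInner rot refl ln dist l = l.any (fun i => decide ((pvDA rot refl ln i : Int) ≤ dist)) := by
  induction l with
  | nil => simp [pvAInner]
  | cons i rest ih =>
    have hstep : pvAInner rot refl ln dist (i :: rest) =
        if ((pvDA rot refl ln i : Int)) ≤ dist then true else pvAInner rot refl ln dist rest := rfl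
    rw [hstep, List.any_cons, ih]
    split_ifs with h <;> simp [h]

theorem pvRot_getD (s : List Char) (r j : Nat) (hr : r < s.length) (hj : j < s.length) (d : Char) :
    (s.drop r ++ s.take r).getD j d = s.getD ((r + j) % s.length) d := by
  simp only [List.getD_eq_getElem?_getD, List.getElem?_append, List.length_drop,
    List.getElem?_drop, List.getElem?_take]
  by_cases hcase : j < s.length - r
  · have hm : (r + j) % s.length = r + j := Nat.mod_eq_of_lt (by omega)
    rw [if_pos hcase, hm]
  · have hge : s.length ≤ r + j := by omega
    have hm : (r + j) % s.length = j - (s.length - r) := by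
      rw [Nat.mod_eq_sub_mod hge, Nat.mod_eq_of_lt (by omega)]
      omega
    have hlt : j - (s.length - r) < r := by omega
    rw [if_neg hcase, hm, if_pos hlt]

theorem pvCountP_zip (xs ys : List Char) (h : xs.length = ys.length) :
    ((xs.zip ys).countP (fun p => p.1 != p.2)) =
      (List.range xs.length).countP (fun j => xs.getD j 'A' != ys.getD j 'A') := by
  induction xs generalizing ys with
  | nil => simp
  | cons x xs ih =>
    cases ys with
    | nil => simp at h
    | cons y ys =>
      simp only [List.zip_cons_cons, List.countP_cons, List.length_cons,
        List.range_succ_eq_map, List.countP_map]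
      rw [ih ys (by simpa using h)]
      have hc : List.countP ((fun j => (x :: xs).getD j 'A' != (y :: ys).getD j 'A') ∘ Nat.succ)
          (List.range xs.length)
          = List.countP (fun j => xs.getD j 'A' != ys.getD j 'A') (List.range xs.length) := by
        apply List.countP_congr
        intro j hj
        simp [Function.comp, Nat.succ_eq_add_one]
      rw [hc]
      simp

theorem pvDA_eq_mism (s refl : List Char) (r : Nat) (h : s.length = refl.length)
    (hr : r < refl.length) :
    pvDA (s ++ s) refl refl.length (r : Int) = pvMism s refl refl.length r := by
  have hslice : PySem.List.slice (s ++ s) (some (r : Int)) (some ((r : Int) + (refl.length : Int))) =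
      s.drop r ++ s.take r := by
    rw [PySem.List.slice_natCast_add (s ++ s) r refl.length]
    rw [List.drop_append, List.take_append]
    have h1 : List.drop (r - s.length) s = s := by rw [Nat.sub_eq_zero_of_le (by omega)]; simp
    have h2 : List.take refl.length (List.drop r s) = List.drop r s :=
      List.take_of_length_le (by simp; omega)
    have h3 : refl.length - (List.drop r s).length = r := by simp; omega
    rw [h1, h2, h3]
  rw [pvDA, hslice, pvCountP_zip _ refl (by simp; omega)]
  have hlen : (s.drop r ++ s.take r).length = refl.length := by simp; omega
  rw [hlen, pvMism]
  apply List.countP_congr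
  intro j hj
  rw [List.mem_range] at hj
  rw [pvRot_getD s r j (by omega) (by omega), h]

-- B's inner loop over seq = a fold of bumps over the filtered/mapped offset list
theorem pvInner_fold (s : List Char) (jc : Int × Char) (n : Nat) (a : List Nat) :
    (PySem.List.enumerate s).foldl (fun diffs kc =>
      if kc.2 != jc.2 then
        diffs.modify ((PySem.Int.mod (kc.1 - jc.1) (n : Int)).toNat) (· + 1)
      else diffs) a =
    (((PySem.List.enumerate s).filter (fun kc => kc.2 != jc.2)).map
      (fun kc => (PySem.Int.mod (kc.1 - jc.1) (n : Int)).toNat)).foldl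
      (fun a i => a.modify i (· + 1)) a := by
  generalize PySem.List.enumerate s = l
  induction l generalizing a with
  | nil => rfl
  | cons x xs ih =>
    simp only [List.foldl_cons, List.filter_cons]
    by_cases hx : (x.2 != jc.2) = true
    · simp only [hx, if_true]
      rw [ih]
      simp
    · simp only [hx, if_false]
      rw [ih]
      simp [hx]

theorem pvHist_length (l : List Nat) (a : List Nat) :
    (l.foldl (fun a i => a.modify i (· + 1)) a).length = a.length := by
  induction l generalizing a with
  | nil => rfl
  | cons i xs ih => simp [List.foldl_cons, ih]

theorem pvHist_getD (l : List Nat) (a : List Nat) (r : Nat) (hr : r < a.length) :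
    (l.foldl (fun a i => a.modify i (· + 1)) a).getD r 0 = a.getD r 0 + l.count r := by
  induction l generalizing a with
  | nil => simp
  | cons i xs ih =>
    simp only [List.foldl_cons]
    rw [ih _ (by simp [hr]), List.count_cons]
    simp only [List.getD_eq_getElem?_getD, List.getElem?_modify]
    cases hcell : a[r]? with
    | none =>
      simp at hcell
      omega
    | some v =>
      by_cases hir : i = r
      · simp [hir]
        omega
      · simp [hir]

-- the flat list of offsets B's nested loops bump
def pvOffs (refl s : List Char) (n : Nat) : List Nat :=
  (PySem.List.enumerate refl).flatMap (fun jc =>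
    ((PySem.List.enumerate s).filter (fun kc => kc.2 != jc.2)).map
      (fun kc => (PySem.Int.mod (kc.1 - jc.1) (n : Int)).toNat))

theorem pvBDiffs_eq_hist (refl s : List Char) (n : Nat) :
    pvBDiffs refl s n =
      (pvOffs refl s n).foldl (fun a i => a.modify i (· + 1)) (List.replicate n 0) := by
  rw [pvBDiffs, pvOffs]
  generalize List.replicate n 0 = a
  induction PySem.List.enumerate refl generalizing a with
  | nil => rfl
  | cons jc rest ih =>
    simp only [List.foldl_cons, List.flatMap_cons, List.foldl_append]
    rw [pvInner_fold s jc n a, ih]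

theorem pvSum_map_ite (l : List Nat) (p : Nat → Bool) :
    (l.map (fun j => if p j then 1 else 0)).sum = l.countP p := by
  induction l with
  | nil => rfl
  | cons x xs ih =>
    simp only [List.map_cons, List.sum_cons, List.countP_cons, ih]
    by_cases h : p x
    · simp [h]
      omega
    · simp [h]

-- the arithmetic core: Python's (k - j) % n hits r exactly when k = (r + j) % n
theorem pvIdx_eq (k j r n : Nat) (hk : k < n) (hj : j < n) (hr : r < n) :
    ((PySem.Int.mod ((k : Int) - (j : Int)) (n : Int)).toNat = r) ↔ k = (r + j) % n := by
  rw [PySem.Int.mod_eq_emod_of_pos (by omega : (0:Int) < (n : Int))]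
  have hmod : (r + j) % n = if r + j < n then r + j else r + j - n := by
    by_cases hlt : r + j < n
    · rw [if_pos hlt, Nat.mod_eq_of_lt hlt]
    · rw [if_neg hlt, Nat.mod_eq_sub_mod (by omega), Nat.mod_eq_of_lt (by omega)]
  by_cases hle : j ≤ k
  · have he : ((k : Int) - j) = ((k - j : Nat) : Int) := by omega
    rw [he, Int.emod_eq_of_lt (by omega) (by omega), hmod]
    split_ifs <;> omega
  · have he : ((k : Int) - j) % n = ((k : Int) - j + n) % n := (Int.add_emod_right _ _).symm
    have he2 : ((k : Int) - j + n) = ((k + n - j : Nat) : Int) := by omega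
    rw [he, he2, Int.emod_eq_of_lt (by omega) (by omega), hmod]
    split_ifs <;> omega

-- one ref position's contribution to the histogram entry r
theorem pvCount_perJ (s : List Char) (n jn r : Nat) (cr : Char) (hs : s.length = n)
    (hj : jn < n) (hr : r < n) :
    (((PySem.List.enumerate s).filter (fun kc => kc.2 != cr)).map
      (fun kc => (PySem.Int.mod (kc.1 - (jn : Int)) (n : Int)).toNat)).count r =
    (if s.getD ((r + jn) % n) 'A' != cr then 1 else 0) := by
  rw [List.count_eq_countP, List.countP_map, List.countP_filter,
    PySem.List.enumerate_eq_map_pyRange s 'A', List.countP_map, PySem.List.pyRange_one,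
    List.countP_map]
  have hlen : ((PySem.List.len s) - 0).toNat = n := by
    simp [PySem.List.len, hs]
  rw [hlen]
  simp only [Function.comp_def, zero_add]
  have hk0n : (r + jn) % n < n := Nat.mod_lt _ (by omega)
  have hpt : ∀ k ∈ List.range n,
      ((((PySem.Int.mod ((k : Int) - (jn : Int)) ((n : Nat) : Int)).toNat == r) &&
        (PySem.List.pyGetD s (k : Int) 'A' != cr)) = true ↔
        ((k == (r + jn) % n) && (s.getD ((r + jn) % n) 'A' != cr)) = true) := by
    intro k hk
    rw [List.mem_range] at hk
    have hget : PySem.List.pyGetD s ((k : Nat) : Int) 'A' = s.getD k 'A' := by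
      rw [PySem.List.pyGetD_of_nonneg s 'A' (by omega)]
      norm_num
    have hidx : ((PySem.Int.mod ((k : Int) - (jn : Int)) (n : Int)).toNat = r) ↔
        k = (r + jn) % n := pvIdx_eq k jn r n hk hj hr
    simp only [hget, Bool.and_eq_true, beq_iff_eq, bne_iff_ne, ne_eq]
    constructor
    · rintro ⟨h1, h2⟩
      have hk0' : k = (r + jn) % n := hidx.mp h1
      exact ⟨hk0', by rw [← hk0']; exact h2⟩
    · rintro ⟨h1, h2⟩
      exact ⟨hidx.mpr h1, by rw [h1]; exact h2⟩
  rw [List.countP_congr hpt]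
  by_cases hq : (s.getD ((r + jn) % n) 'A' != cr) = true
  · simp only [hq, Bool.and_true]
    rw [← List.count_eq_countP, List.count_range, if_pos hk0n]
    simp [hq]
  · simp only [hq, Bool.and_false, List.countP_false]
    simp [hq]


theorem pvCount_offs (refl s : List Char) (r : Nat) (h : s.length = refl.length)
    (hr : r < refl.length) :
    (pvOffs refl s refl.length).count r = pvMism s refl refl.length r := by
  rw [pvOffs, List.count_flatMap, PySem.List.enumerate_eq_map_pyRange refl 'A',
    PySem.List.pyRange_one, List.map_map, List.map_map]
  have hlen : ((PySem.List.len refl) - 0).toNat = refl.length := by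
    simp [PySem.List.len]
  rw [hlen]
  simp only [Function.comp_def, zero_add]
  have hmap : ∀ jn ∈ List.range refl.length,
      (List.count r
        (((PySem.List.enumerate s).filter
            (fun kc => kc.2 != PySem.List.pyGetD refl ((jn : Nat) : Int) 'A')).map
          (fun kc => (PySem.Int.mod (kc.1 - ((jn : Nat) : Int)) ((refl.length : Nat) : Int)).toNat)) =
        (fun jn => if s.getD ((r + jn) % refl.length) 'A' != refl.getD jn 'A' then 1 else 0) jn) := by
    intro jn hjn
    rw [List.mem_range] at hjn
    have hget : PySem.List.pyGetD refl ((jn : Nat) : Int) 'A' = refl.getD jn 'A' := by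
      rw [PySem.List.pyGetD_of_nonneg refl 'A' (by omega)]
      norm_num
    rw [hget]
    exact pvCount_perJ s refl.length jn r (refl.getD jn 'A') h hjn hr
  rw [List.map_congr_left hmap, pvSum_map_ite, pvMism]

theorem pvAny_getD (l : List Nat) (p : Nat → Bool) :
    l.any p = (List.range l.length).any (fun r => p (l.getD r 0)) := by
  induction l with
  | nil => rfl
  | cons x xs ih =>
    simp only [List.any_cons, List.length_cons, List.range_succ_eq_map, List.any_map]
    rw [ih]
    rfl

theorem pvAny_congr {α : Type} (l : List α) (p q : α → Bool) (h : ∀ x ∈ l, p x = q x) :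
    l.any p = l.any q := by
  induction l with
  | nil => rfl
  | cons x xs ih =>
    simp only [List.any_cons, h x List.mem_cons_self,
      ih (fun y hy => h y (List.mem_cons_of_mem x hy))]

theorem pvPerSeq (s refl : List Char) (dist : Int) (h : s.length = refl.length) :
    pvAInner (s ++ s) refl refl.length dist (PySem.List.pyRange 0 (s.length : Int) 1) =
      (pvBDiffs refl s refl.length).any (fun d => decide ((d : Int) ≤ dist)) := by
  rw [pvAInner_eq_any, PySem.List.pyRange_one, List.any_map]
  have hA : ∀ r ∈ List.range (((s.length : Int) - 0).toNat),
      ((fun i => decide ((pvDA (s ++ s) refl refl.length i : Int) ≤ dist)) ∘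
        fun (k : Nat) => 0 + (k : Int)) r = decide ((pvMism s refl refl.length r : Int) ≤ dist) := by
    intro r hrm
    rw [List.mem_range] at hrm
    simp only [Function.comp, zero_add]
    rw [pvDA_eq_mism s refl r h (by omega)]
  rw [pvAny_congr _ _ _ hA]
  have hlenB : (pvBDiffs refl s refl.length).length = refl.length := by
    rw [pvBDiffs_eq_hist, pvHist_length, List.length_replicate]
  conv_rhs => rw [pvAny_getD (pvBDiffs refl s refl.length), hlenB]
  have hB : ∀ r ∈ List.range refl.length,
      (fun r => decide (((pvBDiffs refl s refl.length).getD r 0 : Int) ≤ dist)) r =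
        decide ((pvMism s refl refl.length r : Int) ≤ dist) := by
    intro r hrm
    rw [List.mem_range] at hrm
    have hgd : (pvBDiffs refl s refl.length).getD r 0 = pvMism s refl refl.length r := by
      rw [pvBDiffs_eq_hist, pvHist_getD _ _ r (by simp [hrm]),
        pvCount_offs refl s r h hrm]
      simp [List.getD_eq_getElem?_getD, List.getElem?_replicate, hrm]
    simp only [hgd]
  rw [pvAny_congr _ _ _ hB]
  have hcast : ((s.length : Int) - 0).toNat = refl.length := by omega
  rw [hcast]

-- ===== VERDICT (by name: the statement is the Claim_ definition above) =====
theorem n_similar_v2_spec : Claim_equal_n_similar_v2 := by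
  intro ref seqs dist _
  unfold Spec_n_similar_v2 n_similar_v2 n_similar_v2_alt
  simp only
  apply List.foldl_ext
  intro a seq _
  by_cases hl : seq.toList.length = ref.toList.length
  · have hfalse : ¬ (seq.toList.length ≠ ref.toList.length) := by simpa using hl
    rw [if_neg hfalse, if_neg hfalse, pvPerSeq seq.toList ref.toList dist hl]
  · rw [if_pos hl, if_pos hl]
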